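-- pv_equiv track=rewrite | github.com/TheRedEnd2000/AdvancedHunt | scripts/scan_hardcoded.py | _mask_java_comments
-- ===== SOURCE A (Python) =====
-- def _mask_java_comments(text: str) -> str:
--     """Return a same-length string with Java comments replaced by spaces."""
--     out = list(text)
--     in_string = False
--     in_char = False
--     escaped = False
--     in_line_comment = False
--     in_block_comment = False
--
--     i = 0
--     while i < len(out):
--         ch = out[i]
--
--         if in_line_comment:
--             if ch == "\n":
--                 in_line_comment = False
--                 i += 1
--                 continue
--             out[i] = " "
--             i += 1
--             continue
--
--         if in_block_comment:
--             if ch == "*" and i + 1 < len(out) and out[i + 1] == "/":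
--                 out[i] = " "
--                 out[i + 1] = " "
--                 in_block_comment = False
--                 i += 2
--                 continue
--             if ch != "\n":
--                 out[i] = " "
--             i += 1
--             continue
--
--         if in_string:
--             if escaped:
--                 escaped = False
--             elif ch == "\\":
--                 escaped = True
--             elif ch == '"':
--                 in_string = False
--             i += 1
--             continue
--
--         if in_char:
--             if escaped:
--                 escaped = False
--             elif ch == "\\":
--                 escaped = True
--             elif ch == "'":
--                 in_char = False
--             i += 1
--             continue
--
--         # Start of comments?
--         if ch == "/" and i + 1 < len(out):
--             next_ch = out[i + 1]
--             if next_ch == "/":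
--                 in_line_comment = True
--                 out[i] = " "
--                 out[i + 1] = " "
--                 i += 2
--                 continue
--             elif next_ch == "*":
--                 in_block_comment = True
--                 out[i] = " "
--                 out[i + 1] = " "
--                 i += 2
--                 continue
--
--         # Start of literals?
--         if ch == '"':
--             in_string = True
--         elif ch == "'":
--             in_char = True
--
--         i += 1
--
--     return "".join(out)
-- ===== SOURCE B (Python) =====
-- def _mask_java_comments(text: str) -> str:
--     """Token-based rewrite: consume whole comments/literals at a time instead of a
--     per-character boolean state machine; same output, newlines in comments kept."""
--     n = len(text)
--     out = []
--     i = 0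
--     while i < n:
--         ch = text[i]
--         if ch == '/' and i + 1 < n and text[i + 1] == '/':
--             i += 2
--             j = text.find('\n', i)
--             if j == -1:
--                 j = n
--             out.append('  ' + ' ' * (j - i))
--             i = j
--         elif ch == '/' and i + 1 < n and text[i + 1] == '*':
--             i += 2
--             j = text.find('*/', i)
--             end = n if j == -1 else j
--             out.append('  ' + ''.join('\n' if c == '\n' else ' ' for c in text[i:end]))
--             if j != -1:
--                 out.append('  ')
--                 end = j + 2
--             i = end
--         elif ch == '"' or ch == "'":
--             j = i + 1
--             while j < n:
--                 if text[j] == '\\':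
--                     j += 2
--                 elif text[j] == ch:
--                     j += 1
--                     break
--                 else:
--                     j += 1
--             j = min(j, n)
--             out.append(text[i:j])
--             i = j
--         else:
--             out.append(ch)
--             i += 1
--     return ''.join(out)
-- ===== Notes on version B (the rewrite author's own statement) =====
-- stated objective: alternative
-- what changed: Replaced the per-character five-flag boolean state machine with a token scanner that consumes whole line comments, block comments and string/char literals at a time (using str.find to jump to each token's end) and concatenates the masked/verbatim pieces.
import Mathlib
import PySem

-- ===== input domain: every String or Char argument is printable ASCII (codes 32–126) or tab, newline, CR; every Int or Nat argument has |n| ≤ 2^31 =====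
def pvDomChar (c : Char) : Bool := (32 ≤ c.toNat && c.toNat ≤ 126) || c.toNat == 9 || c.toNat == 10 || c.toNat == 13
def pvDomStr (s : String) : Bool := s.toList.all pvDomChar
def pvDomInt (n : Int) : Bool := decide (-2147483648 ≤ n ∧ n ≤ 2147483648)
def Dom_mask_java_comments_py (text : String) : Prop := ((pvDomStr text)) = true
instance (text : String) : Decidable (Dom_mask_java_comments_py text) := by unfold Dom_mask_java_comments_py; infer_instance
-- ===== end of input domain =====

-- B replaces A's per-character boolean state machine by a token scanner that consumes
-- whole comments and literals at a time (objective: alternative decomposition, same cost).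

-- ===== PORT A =====
-- per-character state machine; flags in order: in_string, in_char, escaped, in_line_comment, in_block_comment
def maskA : List Char → Bool → Bool → Bool → Bool → Bool → List Char
  | [], _, _, _, _, _ => []
  | ch :: rest, inStr, inChr, esc, inLine, inBlock =>
    if inLine then
      if ch = '\n' then ch :: maskA rest inStr inChr esc false inBlock
      else ' ' :: maskA rest inStr inChr esc inLine inBlock
    else if inBlock then
      -- Python: ch == '*' and i+1 < len(out) and out[i+1] == '/'
      (if ch = '*' ∧ rest.head? = some '/' then
        ' ' :: ' ' :: maskA rest.tail inStr inChr esc inLine false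
      else (if ch = '\n' then ch else ' ') :: maskA rest inStr inChr esc inLine inBlock)
    else if inStr then
      if esc then ch :: maskA rest inStr inChr false inLine inBlock
      else if ch = '\\' then ch :: maskA rest inStr inChr true inLine inBlock
      else if ch = '"' then ch :: maskA rest false inChr esc inLine inBlock
      else ch :: maskA rest inStr inChr esc inLine inBlock
    else if inChr then
      if esc then ch :: maskA rest inStr inChr false inLine inBlock
      else if ch = '\\' then ch :: maskA rest inStr inChr true inLine inBlock
      else if ch = '\'' then ch :: maskA rest inStr false esc inLine inBlock
      else ch :: maskA rest inStr inChr esc inLine inBlock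
    else
      -- Python: ch == '/' and i+1 < len(out), then out[i+1] in {'/', '*'}
      (if ch = '/' ∧ rest.head? = some '/' then
        ' ' :: ' ' :: maskA rest.tail inStr inChr esc true inBlock
      else if ch = '/' ∧ rest.head? = some '*' then
        ' ' :: ' ' :: maskA rest.tail inStr inChr esc inLine true
      else
        if ch = '"' then ch :: maskA rest true inChr esc inLine inBlock
        else if ch = '\'' then ch :: maskA rest inStr true esc inLine inBlock
        else ch :: maskA rest inStr inChr esc inLine inBlock)
termination_by cs _ _ _ _ _ => cs.length
decreasing_by all_goals (simp [List.length_tail]; try omega)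

def mask_java_comments_py (text : String) : String :=
  String.mk (maskA text.toList false false false false false)

-- ===== PORT B =====
-- Source B's text.find('\n', i): spaces up to (excluding) the next newline, plus the remainder
def lineRest : List Char → List Char × List Char
  | [] => ([], [])
  | c :: cs => if c = '\n' then ([], c :: cs) else
      (' ' :: (lineRest cs).1, (lineRest cs).2)

-- Source B's text.find('*/', i): mask (newlines kept) up to and including "*/" (or EOF), plus the remainder
def blockRest : List Char → List Char × List Char
  | [] => ([], [])
  | c :: cs =>
    if c = '*' ∧ cs.head? = some '/' then ([' ', ' '], cs.tail)
    else ((if c = '\n' then c else ' ') :: (blockRest cs).1, (blockRest cs).2)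

-- Source B's literal scan: verbatim text up to and including the unescaped closing quote (or EOF)
def litRest (q : Char) : List Char → List Char × List Char
  | [] => ([], [])
  | c :: cs =>
    if c = '\\' then (c :: cs.take 1 ++ (litRest q cs.tail).1, (litRest q cs.tail).2)
    else if c = q then ([c], cs)
    else (c :: (litRest q cs).1, (litRest q cs).2)
termination_by cs => cs.length
decreasing_by all_goals (simp [List.length_tail]; try omega)

theorem lineRest_len : ∀ cs : List Char, (lineRest cs).2.length ≤ cs.length := by
  intro cs
  fun_induction lineRest cs <;> simp_all <;> omega

theorem blockRest_len : ∀ cs : List Char, (blockRest cs).2.length ≤ cs.length := by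
  intro cs
  fun_induction blockRest cs <;> simp_all [List.length_tail] <;> omega

theorem litRest_len : ∀ (q : Char) (cs : List Char), (litRest q cs).2.length ≤ cs.length := by
  intro q cs
  fun_induction litRest q cs <;> simp_all [List.length_tail] <;> omega

def maskB : List Char → List Char
  | [] => []
  | ch :: cs =>
    if ch = '/' ∧ cs.head? = some '/' then
      ' ' :: ' ' :: (lineRest cs.tail).1 ++ maskB (lineRest cs.tail).2
    else if ch = '/' ∧ cs.head? = some '*' then
      ' ' :: ' ' :: (blockRest cs.tail).1 ++ maskB (blockRest cs.tail).2
    else if ch = '"' ∨ ch = '\'' then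
      ch :: (litRest ch cs).1 ++ maskB (litRest ch cs).2
    else ch :: maskB cs
termination_by cs => cs.length
decreasing_by
  · have := lineRest_len cs.tail; have h2 : cs.tail.length ≤ cs.length := by
      cases cs <;> simp
    simp; omega
  · have := blockRest_len cs.tail; have h2 : cs.tail.length ≤ cs.length := by
      cases cs <;> simp
    simp; omega
  · have := litRest_len ch cs; simp; omega
  · simp

def mask_java_comments_py_alt (text : String) : String :=
  String.mk (maskB text.toList)

-- ===== PRECONDITION & SPEC =====
def Spec_mask_java_comments_py (text : String) (out : String) : Prop := out = mask_java_comments_py_alt text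
instance (text : String) (out : String) : Decidable (Spec_mask_java_comments_py text out) := by unfold Spec_mask_java_comments_py; infer_instance

-- ===== CLAIM (what is proved, stated in full; the proofs are below) =====
def Claim_equal_mask_java_comments_py : Prop := ∀ (text : String), Dom_mask_java_comments_py text → Spec_mask_java_comments_py text (mask_java_comments_py text)

-- ===== LEMMAS AND PROOFS =====

-- A in line-comment mode runs lineRest, then resumes in normal mode
theorem maskA_line : ∀ cs : List Char,
    maskA cs false false false true false =
      (lineRest cs).1 ++ maskA (lineRest cs).2 false false false false false := by
  intro cs
  fun_induction lineRest cs <;> simp_all [maskA]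

-- A in block-comment mode runs blockRest, then resumes in normal mode
theorem maskA_block : ∀ cs : List Char,
    maskA cs false false false false true =
      (blockRest cs).1 ++ maskA (blockRest cs).2 false false false false false := by
  intro cs
  fun_induction blockRest cs <;> simp_all [maskA]

-- A one step after a backslash inside a literal: the next char is copied, escape cleared
theorem maskA_escS : ∀ cs : List Char,
    maskA cs true false true false false =
      cs.take 1 ++ maskA cs.tail true false false false false := by
  intro cs; cases cs <;> simp [maskA]

theorem maskA_escC : ∀ cs : List Char,
    maskA cs false true true false false =
      cs.take 1 ++ maskA cs.tail false true false false false := by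
  intro cs; cases cs <;> simp [maskA]

-- A in string mode runs litRest '"', then resumes in normal mode
theorem maskA_str : ∀ cs : List Char,
    maskA cs true false false false false =
      (litRest '"' cs).1 ++ maskA (litRest '"' cs).2 false false false false false := by
  intro cs
  fun_induction litRest '"' cs <;> simp_all [maskA, maskA_escS]

-- A in char mode runs litRest '\'', then resumes in normal mode
theorem maskA_chr : ∀ cs : List Char,
    maskA cs false true false false false =
      (litRest '\'' cs).1 ++ maskA (litRest '\'' cs).2 false false false false false := by
  intro cs
  fun_induction litRest '\'' cs <;> simp_all [maskA, maskA_escC]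

theorem maskA_eq_maskB : ∀ cs : List Char,
    maskA cs false false false false false = maskB cs := by
  intro cs
  fun_induction maskB cs with
  | case1 => simp [maskA]
  | case2 => simp_all [maskA, maskA_line]
  | case3 => simp_all [maskA, maskA_block]
  | case4 =>
    rename_i c cs h1 h2 h ih
    rcases h with rfl | rfl <;> simp_all [maskA, maskA_str, maskA_chr]
  | case5 =>
    rename_i c cs h1 h2 h ih
    by_cases hc : c = '/'
    · subst hc; simp_all [maskA]
    · simp_all [maskA, hc]

-- ===== VERDICT (by name: the statement is the Claim_ definition above) =====
theorem mask_java_comments_py_spec : Claim_equal_mask_java_comments_py := by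
  intro text _
  unfold Spec_mask_java_comments_py mask_java_comments_py mask_java_comments_py_alt
  rw [maskA_eq_maskB]
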